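-- pv_equiv track=rewrite | github.com/thecybro/Insight-Predictor | storage/backup_formulae.py | values_finder
-- ===== SOURCE A (Python) =====
-- def values_finder(X, Y):
--     if len(X) != len(Y):
--         return "Lengths are not equal!"
--
--     N = len(X)
--     EX = EY = EX2 = EY2 = EXY = 0
--
--     for (x,y) in zip(X,Y):
--         EX += x
--         EY += y
--         EX2 += x**2
--         EY2 += y**2
--         EXY += x*y
--
--     return N, EX, EY, EX2, EY2, EXY
-- ===== SOURCE B (Python) =====
-- def _go(L):
--     if not L:
--         return (0, 0, 0, 0, 0)
--     if len(L) == 1: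
--         (x, y) = L[0]
--         return (x, y, x * x, y * y, x * y)
--     m = len(L) // 2
--     a = _go(L[:m])
--     b = _go(L[m:])
--     return (a[0] + b[0], a[1] + b[1], a[2] + b[2], a[3] + b[3], a[4] + b[4])
--
--
-- def values_finder(X, Y):
--     if len(X) != len(Y):
--         return "Lengths are not equal!"
--     s = _go(list(zip(X, Y)))
--     return (len(X), s[0], s[1], s[2], s[3], s[4])
-- ===== Notes on version B (the rewrite author's own statement) =====
-- stated objective: alternative
-- what changed: Replaces A's single left-to-right accumulator loop with a recursive divide-and-conquer: the zipped list is split in half, the five sums are computed on each half and combined component-wise; correct because all five quantities are component-wise additive under list concatenation. Pre_ excludes unequal-length inputs, where both implementations return the string 'Lengths are not equal!' instead of a tuple of ints.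
-- outside the precondition, e.g. on values_finder([1], []): A returns 'Lengths are not equal!', B returns 'Lengths are not equal!'
import Mathlib
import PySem

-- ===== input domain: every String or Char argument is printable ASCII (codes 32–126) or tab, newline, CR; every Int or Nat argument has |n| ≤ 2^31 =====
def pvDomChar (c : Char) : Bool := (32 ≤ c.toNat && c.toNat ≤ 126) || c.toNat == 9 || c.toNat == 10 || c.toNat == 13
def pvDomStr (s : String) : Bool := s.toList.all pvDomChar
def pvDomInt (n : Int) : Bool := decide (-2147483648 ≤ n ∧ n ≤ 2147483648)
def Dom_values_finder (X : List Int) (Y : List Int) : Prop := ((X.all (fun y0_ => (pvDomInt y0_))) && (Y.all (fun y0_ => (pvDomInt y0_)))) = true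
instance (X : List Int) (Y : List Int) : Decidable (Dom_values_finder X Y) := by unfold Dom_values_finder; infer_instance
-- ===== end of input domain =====

-- B replaces A's single fused accumulator loop with a recursive divide-and-conquer over the zipped list (split in half, combine the five component-wise-additive sums); same result, different traversal.
-- Pre_ excludes unequal-length inputs, on which both Pythons return the string "Lengths are not equal!" (not a value of the tuple type).


-- ===== PORT A =====
-- the for-loop over zip(X,Y) with the five running accumulators, as a foldl over the same state
def values_finder (X : List Int) (Y : List Int) : Int × Int × Int × Int × Int × Int :=
  let N : Int := X.length
  let s := (X.zip Y).foldl
    (fun (acc : Int × Int × Int × Int × Int) (p : Int × Int) =>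
      (acc.1 + p.1, acc.2.1 + p.2, acc.2.2.1 + p.1 ^ 2, acc.2.2.2.1 + p.2 ^ 2, acc.2.2.2.2 + p.1 * p.2))
    (0, 0, 0, 0, 0)
  (N, s.1, s.2.1, s.2.2.1, s.2.2.2.1, s.2.2.2.2)

-- ===== PORT B =====
-- _go: divide-and-conquer on the zipped list; L[:m] / L[m:] ported as take/drop
def pvGo : List (Int × Int) → Int × Int × Int × Int × Int
  | [] => (0, 0, 0, 0, 0)
  | [p] => (p.1, p.2, p.1 * p.1, p.2 * p.2, p.1 * p.2)
  | p :: q :: rest =>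
    let L := p :: q :: rest
    let m := L.length / 2
    let a := pvGo (L.take m)
    let b := pvGo (L.drop m)
    (a.1 + b.1, a.2.1 + b.2.1, a.2.2.1 + b.2.2.1, a.2.2.2.1 + b.2.2.2.1, a.2.2.2.2 + b.2.2.2.2)
termination_by L => L.length
decreasing_by
  · simp [List.length_take]; omega
  · simp [List.length_drop]; omega

def values_finder_alt (X : List Int) (Y : List Int) : Int × Int × Int × Int × Int × Int :=
  let s := pvGo (X.zip Y)
  ((X.length : Int), s.1, s.2.1, s.2.2.1, s.2.2.2.1, s.2.2.2.2)

-- ===== PRECONDITION & SPEC =====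
-- Pre_ excludes len(X) != len(Y): there both Pythons return the string "Lengths are not equal!", not an int tuple.
def Pre_values_finder (X : List Int) (Y : List Int) : Prop := X.length = Y.length
instance (X : List Int) (Y : List Int) : Decidable (Pre_values_finder X Y) := by unfold Pre_values_finder; infer_instance
def pvWitness_values_finder : List Int × List Int := ([1, 2, 3], [4, 5, 6])

def Spec_values_finder (X : List Int) (Y : List Int) (out : Int × Int × Int × Int × Int × Int) : Prop := out = values_finder_alt X Y
instance (X : List Int) (Y : List Int) (out : Int × Int × Int × Int × Int × Int) : Decidable (Spec_values_finder X Y out) := by unfold Spec_values_finder; infer_instance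

-- ===== CLAIM (what is proved, stated in full; the proofs are below) =====
def Claim_equal_values_finder : Prop := ∀ (X : List Int) (Y : List Int), Dom_values_finder X Y → Pre_values_finder X Y → Spec_values_finder X Y (values_finder X Y)

-- ===== LEMMAS AND PROOFS =====

-- the common value both programs compute: the five sums over the zipped list
def pvSums (L : List (Int × Int)) : Int × Int × Int × Int × Int :=
  ((L.map Prod.fst).sum, (L.map Prod.snd).sum,
   (L.map (fun p => p.1 * p.1)).sum, (L.map (fun p => p.2 * p.2)).sum,
   (L.map (fun p => p.1 * p.2)).sum)

theorem pvSums_append (A B : List (Int × Int)) :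
    pvSums (A ++ B) = (((pvSums A).1 + (pvSums B).1, (pvSums A).2.1 + (pvSums B).2.1,
      (pvSums A).2.2.1 + (pvSums B).2.2.1, (pvSums A).2.2.2.1 + (pvSums B).2.2.2.1,
      (pvSums A).2.2.2.2 + (pvSums B).2.2.2.2) : Int × Int × Int × Int × Int) := by
  simp [pvSums]

theorem pvGo_eq_sums (L : List (Int × Int)) : pvGo L = pvSums L := by
  fun_induction pvGo L with
  | case1 => simp [pvSums]
  | case2 p => simp [pvSums]
  | case3 p q rest L m a b ihT ihD =>
    have h := pvSums_append (List.take m L) (List.drop m L)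
    rw [List.take_append_drop] at h
    simp only [L] at h
    simp only [a, b, ihT, ihD, h]
    rfl

theorem pv_loopA (L : List (Int × Int)) (a b c d e : Int) :
    L.foldl
      (fun (acc : Int × Int × Int × Int × Int) (p : Int × Int) =>
        (acc.1 + p.1, acc.2.1 + p.2, acc.2.2.1 + p.1 ^ 2, acc.2.2.2.1 + p.2 ^ 2, acc.2.2.2.2 + p.1 * p.2))
      (a, b, c, d, e)
    = (a + (pvSums L).1, b + (pvSums L).2.1, c + (pvSums L).2.2.1,
       d + (pvSums L).2.2.2.1, e + (pvSums L).2.2.2.2) := by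
  induction L generalizing a b c d e with
  | nil => simp [pvSums]
  | cons p L ih =>
    simp only [List.foldl_cons, ih, pvSums, List.map_cons, List.sum_cons]
    refine Prod.ext ?_ (Prod.ext ?_ (Prod.ext ?_ (Prod.ext ?_ ?_))) <;> simp <;> ring

theorem values_finder_spec : Claim_equal_values_finder := by
  intro X Y _ _
  unfold Spec_values_finder values_finder values_finder_alt
  simp only [pv_loopA, pvGo_eq_sums, zero_add]
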